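-- pv_equiv track=rewrite | github.com/ixn03/INTELLI_SOFTWARE | backend/app/services/normalization_service.py | _member_suffix
-- ===== SOURCE A (Python) =====
-- from typing import Any, Optional
--
-- _TIMER_COUNTER_MEMBERS: tuple[tuple[str, str], ...] = (
--     (".DN", "done"),
--     (".TT", "timing"),
--     (".EN", "enabled"),
--     (".ACC", "accumulated_value"),
--     (".PRE", "preset_value"),
--     (".CU", "count_up_enable"),
--     (".CD", "count_down_enable"),
-- )
--
-- def _member_suffix(operand: Optional[str]) -> Optional[dict[str, str]]:
--     """Return ``{'member': '.DN', 'semantic': 'done'}`` if ``operand``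
--     accesses a known timer/counter member, else None.
--     """
--
--     if not operand:
--         return None
--     s = operand.strip()
--     for suffix, label in _TIMER_COUNTER_MEMBERS:
--         if s.upper().endswith(suffix):
--             return {"member": suffix.lstrip("."), "semantic": label}
--     return None
-- ===== SOURCE B (Python) =====
-- from typing import Optional
--
-- _MEMBER_SEMANTIC: dict[str, str] = {
--     "DN": "done",
--     "TT": "timing",
--     "EN": "enabled",
--     "ACC": "accumulated_value",
--     "PRE": "preset_value",
--     "CU": "count_up_enable",
--     "CD": "count_down_enable",
-- }
--
-- def _member_suffix(operand: Optional[str]) -> Optional[dict[str, str]]: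
--     """Return ``{'member': 'DN', 'semantic': 'done'}`` if ``operand``
--     accesses a known timer/counter member, else None."""
--     if not operand:
--         return None
--     u = operand.strip().upper()
--     i = u.rfind(".")
--     if i < 0:
--         return None
--     tail = u[i + 1:]
--     label = _MEMBER_SEMANTIC.get(tail)
--     if label is None:
--         return None
--     return {"member": tail, "semantic": label}
-- ===== Notes on version B (the rewrite author's own statement) =====
-- stated objective: idiomatic
-- what changed: Replaces the 7-iteration endswith scan with a single rfind of the last dot followed by one hash lookup of the trailing member token; valid because no member token contains a dot and no listed suffix ends another.
import Mathlib
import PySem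

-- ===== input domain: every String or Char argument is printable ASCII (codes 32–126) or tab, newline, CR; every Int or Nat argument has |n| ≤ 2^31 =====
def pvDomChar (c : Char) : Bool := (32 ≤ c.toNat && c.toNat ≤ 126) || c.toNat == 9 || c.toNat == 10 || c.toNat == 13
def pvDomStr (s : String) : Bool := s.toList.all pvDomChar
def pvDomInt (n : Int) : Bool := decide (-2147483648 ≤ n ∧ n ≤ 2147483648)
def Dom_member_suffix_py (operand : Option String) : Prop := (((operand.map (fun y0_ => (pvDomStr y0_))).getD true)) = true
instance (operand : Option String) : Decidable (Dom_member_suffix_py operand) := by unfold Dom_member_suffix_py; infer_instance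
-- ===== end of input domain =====

-- B replaces A's seven-suffix endswith scan by one rfind of the last '.' plus a single dict
-- lookup of the trailing member token (objective: idiomatic).

-- ===== PORT A =====
def timerCounterMembers : List (String × String) :=
  [(".DN", "done"), (".TT", "timing"), (".EN", "enabled"), (".ACC", "accumulated_value"),
   (".PRE", "preset_value"), (".CU", "count_up_enable"), (".CD", "count_down_enable")]

-- suffix.lstrip(".") ported by hand (PySem has no lstrip-with-chars): drop leading '.' chars; exact.
def lstripDots (s : String) : String := String.ofList (s.toList.dropWhile (fun c => c = '.'))

-- the `for suffix, label in _TIMER_COUNTER_MEMBERS` loop with early return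
def memberLoop (s : String) : List (String × String) → Option (List (String × String))
  | [] => none
  | (suffix, label) :: rest =>
    if PySem.Str.endswith (PySem.Str.upper s) suffix then
      some [("member", lstripDots suffix), ("semantic", label)]
    else memberLoop s rest

def member_suffix_py (operand : Option String) : Option (List (String × String)) :=
  match operand with
  | none => none
  | some op =>
    if op = "" then none
    else memberLoop (PySem.Str.strip op) timerCounterMembers

-- ===== PORT B =====
def memberSemantic : PySem.Dict String String :=
  PySem.Dict.ofList
    [("DN", "done"), ("TT", "timing"), ("EN", "enabled"), ("ACC", "accumulated_value"),
     ("PRE", "preset_value"), ("CU", "count_up_enable"), ("CD", "count_down_enable")]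

def member_suffix_py_alt (operand : Option String) : Option (List (String × String)) :=
  match operand with
  | none => none
  | some op =>
    if op = "" then none
    else
      let u := PySem.Str.upper (PySem.Str.strip op)
      let i := PySem.Str.rfind u "."
      if i < 0 then none
      else
        let tail := PySem.Str.slice u (some (i + 1)) none
        match memberSemantic.get? tail with
        | none => none
        | some label => some [("member", tail), ("semantic", label)]

-- ===== PRECONDITION & SPEC =====
def Spec_member_suffix_py (operand : Option String) (out : Option (List (String × String))) : Prop := out = member_suffix_py_alt operand
instance (operand : Option String) (out : Option (List (String × String))) : Decidable (Spec_member_suffix_py operand out) := by unfold Spec_member_suffix_py; infer_instance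

-- ===== CLAIM (what is proved, stated in full; the proofs are below) =====
def Claim_equal_member_suffix_py : Prop := ∀ (operand : Option String), Dom_member_suffix_py operand → Spec_member_suffix_py operand (member_suffix_py operand)

-- ===== LEMMAS AND PROOFS =====

-- ['.'] is a prefix of l.drop i iff the char at i is '.'
lemma singleton_isPrefixOf_drop (s : List Char) (i : Nat) :
    (['.'].isPrefixOf (s.drop i)) = true ↔ s[i]? = some '.' := by
  rw [List.isPrefixOf_iff_prefix]
  cases h : s.drop i with
  | nil =>
    constructor
    · intro hp; exact absurd (List.IsPrefix.length_le hp) (by simp)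
    · intro hp
      have : (s.drop i).head? = s[i]? := by simp
      rw [h] at this; simp [hp] at this
  | cons c t =>
    have hh : (s.drop i).head? = s[i]? := by simp
    rw [h] at hh
    constructor
    · intro hp
      obtain ⟨r, hr⟩ := hp
      rw [← hr] at hh; simpa using hh.symm
    · intro hp
      rw [hp] at hh
      have : c = '.' := by simpa using hh
      subst this; exact ⟨t, rfl⟩

-- characterization of rfind.go for the single-char needle "."
lemma goSpec (s : List Char) (j : Nat) :
    (PySem.Chars.rfind.go s ['.'] j = -1 ∧ ∀ i : Nat, i ≤ j → s[i]? ≠ some '.') ∨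
    (∃ i : Nat, i ≤ j ∧ PySem.Chars.rfind.go s ['.'] j = (i : Int) ∧ s[i]? = some '.' ∧
      ∀ k : Nat, i < k → k ≤ j → s[k]? ≠ some '.') := by
  induction j with
  | zero =>
    by_cases h : s[0]? = some '.'
    · right
      refine ⟨0, le_refl _, ?_, h, by omega⟩
      have hpre := (singleton_isPrefixOf_drop s 0).2 h
      rw [List.drop_zero] at hpre
      simp [PySem.Chars.rfind.go, hpre]
    · left
      constructor
      · have hpre : (['.'].isPrefixOf s) = false := by
          rw [Bool.eq_false_iff]; intro hc
          exact h ((singleton_isPrefixOf_drop s 0).1 (by rwa [List.drop_zero]))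
        simp [PySem.Chars.rfind.go, hpre]
      · intro i hi; interval_cases i; exact h
  | succ j ih =>
    by_cases h : s[j+1]? = some '.'
    · right
      refine ⟨j+1, le_refl _, ?_, h, by omega⟩
      simp [PySem.Chars.rfind.go, (singleton_isPrefixOf_drop s (j+1)).2 h]
    · have hpf : (['.'].isPrefixOf (s.drop (j+1))) = false := by
        rw [Bool.eq_false_iff]; intro hc; exact h ((singleton_isPrefixOf_drop s (j+1)).1 hc)
      have hstep : PySem.Chars.rfind.go s ['.'] (j+1) = PySem.Chars.rfind.go s ['.'] j := by
        simp [PySem.Chars.rfind.go, hpf]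
      rcases ih with ⟨hgo, hall⟩ | ⟨i, hij, hgo, hdot, hafter⟩
      · left
        refine ⟨hstep.trans hgo, ?_⟩
        intro i hi
        rcases Nat.lt_or_ge i (j+1) with hlt | hge
        · exact hall i (by omega)
        · have : i = j + 1 := by omega
          subst this; exact h
      · right
        refine ⟨i, by omega, hstep.trans hgo, hdot, ?_⟩
        intro k hik hk
        rcases Nat.lt_or_ge k (j+1) with hlt | hge
        · exact hafter k hik (by omega)
        · have : k = j + 1 := by omega
          subst this; exact h

-- the only suffix of form '.'::m ending a string whose last dot is at i is the tail after i
lemma endswith_last_dot (s m : List Char) (i : Nat) (hm : '.' ∉ m)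
    (hi : s[i]? = some '.') (hafter : ∀ k : Nat, i < k → s[k]? ≠ some '.') :
    PySem.Chars.endswith s ('.' :: m) = decide (s.drop (i+1) = m) := by
  obtain ⟨hilen, hival⟩ := List.getElem?_eq_some_iff.1 hi
  by_cases h : s.drop (i+1) = m
  · rw [decide_eq_true h]
    rw [PySem.Chars.endswith_iff]
    have hdrop : s.drop i = '.' :: m := by
      rw [List.drop_eq_getElem_cons hilen, h, hival]
    rw [← hdrop]
    exact List.drop_suffix i s
  · rw [decide_eq_false h, Bool.eq_false_iff]
    intro hc
    obtain ⟨p, hp⟩ := (PySem.Chars.endswith_iff _ _).1 hc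
    -- hp : p ++ '.' :: m = s
    have hpl : s[p.length]? = some '.' := by
      rw [← hp]
      rw [List.getElem?_append_right (le_refl _)]
      simp
    rcases Nat.lt_trichotomy i p.length with hlt | heq | hgt
    · exact hafter p.length hlt hpl
    · apply h
      rw [← hp, heq]
      simp [List.drop_append]
    · -- '.' at index i lands inside m
      apply hm
      have : s[i]? = ('.' :: m)[i - p.length]? := by
        rw [← hp, List.getElem?_append_right (by omega)]
      rw [this] at hi
      have hge1 : 1 ≤ i - p.length := by omega
      have : ('.' :: m)[i - p.length]? = m[i - p.length - 1]? := by
        cases hk : i - p.length with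
        | zero => omega
        | succ n => simp
      rw [this] at hi
      exact List.mem_of_getElem? hi

-- a string with no '.' has no suffix of the form '.'::m
lemma endswith_no_dot (s m : List Char) (hdot : '.' ∉ s) :
    PySem.Chars.endswith s ('.' :: m) = false := by
  rw [Bool.eq_false_iff]
  intro hc
  obtain ⟨p, hp⟩ := (PySem.Chars.endswith_iff _ _).1 hc
  exact hdot (by rw [← hp]; simp)

-- literal dict lookup as a chain of ifs
set_option maxHeartbeats 1000000 in
lemma getMS (t : String) :
    memberSemantic.get? t =
      if t = "DN" then some "done" else if t = "TT" then some "timing"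
      else if t = "EN" then some "enabled" else if t = "ACC" then some "accumulated_value"
      else if t = "PRE" then some "preset_value" else if t = "CU" then some "count_up_enable"
      else if t = "CD" then some "count_down_enable" else none := by
  have hms : memberSemantic = ⟨[("DN", "done"), ("TT", "timing"), ("EN", "enabled"),
      ("ACC", "accumulated_value"), ("PRE", "preset_value"), ("CU", "count_up_enable"),
      ("CD", "count_down_enable")]⟩ := by decide
  rw [hms]
  simp only [PySem.Dict.get?_mk_cons, beq_iff_eq]
  have hnil : (PySem.Dict.mk ([] : List (String × String))).get? t = none := by
    simp [PySem.Dict.get?]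
  simp only [hnil]
  split_ifs <;> first | rfl | (subst_vars; simp_all)

-- ===== VERDICT (by name: the statement is the Claim_ definition above) =====
theorem member_suffix_py_spec : Claim_equal_member_suffix_py := by
  intro operand _
  unfold Spec_member_suffix_py
  cases operand with
  | none => rfl
  | some op =>
    by_cases hop : op = ""
    · simp [member_suffix_py, member_suffix_py_alt, hop]
    · simp only [member_suffix_py, member_suffix_py_alt, if_neg hop,
        memberLoop, timerCounterMembers]
      set u := PySem.Str.upper (PySem.Str.strip op) with hu
      set cs := u.toList with hcs
      have hrfind : PySem.Str.rfind u "." = PySem.Chars.rfind.go cs ['.'] cs.length := by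
        rw [PySem.Str.rfind_eq]; rfl
      rcases goSpec cs cs.length with ⟨hgo, hall⟩ | ⟨i, _, hgo, hdoti, hafter⟩
      · -- no dot anywhere: both sides are none
        have hdot : '.' ∉ cs := by
          intro hm
          obtain ⟨k, hk⟩ := List.mem_iff_getElem?.1 hm
          exact hall k (by
            have : k < cs.length := (List.getElem?_eq_some_iff.1 hk).1
            omega) hk
        have hends : ∀ (sfx : String) (m : List Char), sfx.toList = '.' :: m →
            PySem.Str.endswith u sfx = false := by
          intro sfx m hsfx
          rw [PySem.Str.endswith_eq, ← hcs, hsfx]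
          exact endswith_no_dot cs m hdot
        rw [hrfind, hgo]
        simp only [hends ".DN" ['D','N'] rfl, hends ".TT" ['T','T'] rfl,
          hends ".EN" ['E','N'] rfl, hends ".ACC" ['A','C','C'] rfl,
          hends ".PRE" ['P','R','E'] rfl, hends ".CU" ['C','U'] rfl,
          hends ".CD" ['C','D'] rfl]
        simp
      · -- last dot at index i
        have hafter' : ∀ k : Nat, i < k → cs[k]? ≠ some '.' := by
          intro k hik
          rcases Nat.lt_or_ge k (cs.length + 1) with hk | hk
          · exact hafter k hik (by omega)
          · rw [List.getElem?_eq_none_iff.2 (by omega)]; simp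
        rw [hrfind, hgo]
        have hneg : ¬ ((i : Int) < 0) := by omega
        rw [if_neg hneg]
        set tail := PySem.Str.slice u (some ((i : Int) + 1)) none with htaildef
        have htail : tail.toList = cs.drop (i+1) := by
          rw [htaildef, PySem.Str.toList_slice, PySem.Chars.slice_eq_listSlice,
            PySem.List.slice_from _ (by omega : (0:Int) ≤ (i:Int)+1)]
          have hnat : ((i : Int) + 1).toNat = i + 1 := by omega
          rw [hnat]
        have key : ∀ (sfx tok : String), sfx.toList = '.' :: tok.toList → '.' ∉ tok.toList →
            PySem.Str.endswith u sfx = decide (tail = tok) := by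
          intro sfx tok hsfx hnm
          rw [PySem.Str.endswith_eq, ← hcs, hsfx]
          rw [endswith_last_dot cs tok.toList i hnm hdoti hafter']
          rw [decide_eq_decide]
          rw [← htail, String.toList_inj]
        have l1 : lstripDots ".DN" = "DN" := by decide
        have l2 : lstripDots ".TT" = "TT" := by decide
        have l3 : lstripDots ".EN" = "EN" := by decide
        have l4 : lstripDots ".ACC" = "ACC" := by decide
        have l5 : lstripDots ".PRE" = "PRE" := by decide
        have l6 : lstripDots ".CU" = "CU" := by decide
        have l7 : lstripDots ".CD" = "CD" := by decide
        clear htaildef hcs hu hrfind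
        simp only [key ".DN" "DN" rfl (by decide), key ".TT" "TT" rfl (by decide),
          key ".EN" "EN" rfl (by decide), key ".ACC" "ACC" rfl (by decide),
          key ".PRE" "PRE" rfl (by decide), key ".CU" "CU" rfl (by decide),
          key ".CD" "CD" rfl (by decide), getMS, decide_eq_true_eq]
        split_ifs <;> simp_all
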